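-- pv_equiv track=rewrite | github.com/Galen-Chu/spiritual-g-code | ai_engine/mock_calculator.py | calculate_g_code_intensity
-- ===== SOURCE A (Python) =====
-- from typing import Dict, Optional, List
--
-- def calculate_g_code_intensity(
--
--     transit_data: Dict,
--     aspects: List[Dict]
-- ) -> int:
--     """
--     Calculate G-Code intensity score based on transits and aspects.
--
--     Args:
--         transit_data: Current planetary positions
--         aspects: Aspects to natal chart
--
--     Returns:
--         Intensity score (1-100)
--     """
--     # Base score
--     score = 50
--
--     # Add points for major aspects
--     major_aspects = ['conjunction', 'opposition', 'square']
--     for aspect in aspects: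
--         if aspect['aspect'] in major_aspects:
--             score += 5
--         elif aspect['aspect'] in ['trine', 'sextile']:
--             score += 3
--
--     # Consider planetary positions
--     # Outer planets (slow movers) in aspect = more intensity
--     outer_planets = ['uranus', 'neptune', 'pluto']
--     for aspect in aspects:
--         if aspect.get('transit_planet') in outer_planets:
--             score += 7
--
--     # Moon aspects add emotional intensity
--     for aspect in aspects:
--         if aspect.get('transit_planet') == 'moon':
--             score += 4
--
--     # Normalize to 1-100 range
--     return max(1, min(100, score))
-- ===== SOURCE B (Python) =====
-- ASPECT_POINTS = {'conjunction': 5, 'opposition': 5, 'square': 5,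
--                  'trine': 3, 'sextile': 3}
-- PLANET_POINTS = {'uranus': 7, 'neptune': 7, 'pluto': 7, 'moon': 4}
--
-- def calculate_g_code_intensity(transit_data, aspects):
--     # Table-driven single pass: each aspect contributes a point value looked up
--     # in two weight tables; three conditional scanning loops disappear.
--     total = 50 + sum(ASPECT_POINTS.get(a['aspect'], 0)
--                      + PLANET_POINTS.get(a.get('transit_planet'), 0)
--                      for a in aspects)
--     return min(max(total, 1), 100)
-- ===== Notes on version B (the rewrite author's own statement) =====
-- stated objective: idiomatic
-- what changed: Replaces A's three separate conditional scanning loops (branch chains testing membership in hard-coded lists) with one table-driven pass: two weight dictionaries are consulted per aspect and the per-aspect contributions are summed once, then clamped.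
import Mathlib
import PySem

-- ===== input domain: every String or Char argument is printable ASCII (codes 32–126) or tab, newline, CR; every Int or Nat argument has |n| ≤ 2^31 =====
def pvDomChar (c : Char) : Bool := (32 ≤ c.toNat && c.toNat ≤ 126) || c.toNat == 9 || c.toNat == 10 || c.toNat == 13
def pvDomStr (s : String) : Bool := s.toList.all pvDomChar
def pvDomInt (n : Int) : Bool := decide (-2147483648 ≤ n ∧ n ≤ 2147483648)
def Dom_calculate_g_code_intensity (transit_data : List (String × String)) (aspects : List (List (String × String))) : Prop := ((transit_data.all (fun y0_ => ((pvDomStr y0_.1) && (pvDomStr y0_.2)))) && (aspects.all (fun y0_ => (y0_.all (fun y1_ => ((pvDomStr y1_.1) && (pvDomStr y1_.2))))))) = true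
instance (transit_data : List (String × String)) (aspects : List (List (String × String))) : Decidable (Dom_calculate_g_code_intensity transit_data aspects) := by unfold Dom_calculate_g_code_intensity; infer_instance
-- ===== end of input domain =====

-- B is a table-driven single pass (two weight dictionaries, one summed projection)
-- instead of A's three conditional scanning loops; same cost, more idiomatic.

-- ===== PORT A =====
-- aspect['aspect'] raises KeyError when the key is missing; Pre_ excludes that,
-- so the `.getD ""` default is never reached on claimed inputs.
def calculate_g_code_intensity (transit_data : List (String × String)) (aspects : List (List (String × String))) : Int :=
  let score : Int := 50
  let score := aspects.foldl (fun s a =>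
    let v := (List.lookup "aspect" a).getD ""
    if v ∈ (["conjunction", "opposition", "square"] : List String) then s + 5
    else if v ∈ (["trine", "sextile"] : List String) then s + 3
    else s) score
  let score := aspects.foldl (fun s a =>
    if List.lookup "transit_planet" a ∈ ([some "uranus", some "neptune", some "pluto"] : List (Option String)) then s + 7
    else s) score
  let score := aspects.foldl (fun s a =>
    if List.lookup "transit_planet" a = some "moon" then s + 4 else s) score
  max 1 (min 100 score)

-- ===== PORT B =====
def pvAspectPoints : List (String × Int) :=
  [("conjunction", 5), ("opposition", 5), ("square", 5), ("trine", 3), ("sextile", 3)]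

def pvPlanetPoints : List (String × Int) :=
  [("uranus", 7), ("neptune", 7), ("pluto", 7), ("moon", 4)]

-- PLANET_POINTS.get(a.get('transit_planet'), 0): a missing key yields None, which
-- is never a key of the table, hence 0 — ported as the `none => 0` branch.
def calculate_g_code_intensity_alt (transit_data : List (String × String)) (aspects : List (List (String × String))) : Int :=
  let total : Int := 50 + (aspects.map (fun a =>
      (List.lookup ((List.lookup "aspect" a).getD "") pvAspectPoints).getD 0
      + (match List.lookup "transit_planet" a with
         | some p => (List.lookup p pvPlanetPoints).getD 0
         | none => 0))).sum
  min (max total 1) 100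

-- ===== PRECONDITION & SPEC =====
-- Pre_ excludes inputs where some aspect dict lacks the key "aspect": there Python A
-- raises KeyError (and Python B raises KeyError too).
def Pre_calculate_g_code_intensity (transit_data : List (String × String)) (aspects : List (List (String × String))) : Prop :=
  (aspects.all (fun a => a.any (fun p => p.1 == "aspect"))) = true
instance (transit_data : List (String × String)) (aspects : List (List (String × String))) : Decidable (Pre_calculate_g_code_intensity transit_data aspects) := by unfold Pre_calculate_g_code_intensity; infer_instance

def pvWitness_calculate_g_code_intensity : (List (String × String)) × (List (List (String × String))) :=
  ([("sun", "10")], [[("aspect", "square"), ("transit_planet", "pluto")], [("aspect", "trine")]])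

def Spec_calculate_g_code_intensity (transit_data : List (String × String)) (aspects : List (List (String × String))) (out : Int) : Prop := out = calculate_g_code_intensity_alt transit_data aspects
instance (transit_data : List (String × String)) (aspects : List (List (String × String))) (out : Int) : Decidable (Spec_calculate_g_code_intensity transit_data aspects out) := by unfold Spec_calculate_g_code_intensity; infer_instance

-- ===== CLAIM (what is proved, stated in full; the proofs are below) =====
def Claim_equal_calculate_g_code_intensity : Prop := ∀ (transit_data : List (String × String)) (aspects : List (List (String × String))), Dom_calculate_g_code_intensity transit_data aspects → Pre_calculate_g_code_intensity transit_data aspects → Spec_calculate_g_code_intensity transit_data aspects (calculate_g_code_intensity transit_data aspects)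

-- ===== LEMMAS AND PROOFS =====

-- per-element contributions of A's three loops
def pvF1 (a : List (String × String)) : Int :=
  let v := (List.lookup "aspect" a).getD ""
  if v ∈ (["conjunction", "opposition", "square"] : List String) then 5
  else if v ∈ (["trine", "sextile"] : List String) then 3
  else 0

def pvF2 (a : List (String × String)) : Int :=
  if List.lookup "transit_planet" a ∈ ([some "uranus", some "neptune", some "pluto"] : List (Option String)) then 7 else 0

def pvF3 (a : List (String × String)) : Int :=
  if List.lookup "transit_planet" a = some "moon" then 4 else 0

theorem loop1_eq (l : List (List (String × String))) (s : Int) :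
    l.foldl (fun s a =>
      let v := (List.lookup "aspect" a).getD ""
      if v ∈ (["conjunction", "opposition", "square"] : List String) then s + 5
      else if v ∈ (["trine", "sextile"] : List String) then s + 3
      else s) s = s + (l.map pvF1).sum := by
  induction l generalizing s with
  | nil => simp
  | cons a t ih =>
    simp only [List.foldl_cons, List.map_cons, List.sum_cons, ih, pvF1]
    split_ifs <;> ring

theorem loop2_eq (l : List (List (String × String))) (s : Int) :
    l.foldl (fun s a =>
      if List.lookup "transit_planet" a ∈ ([some "uranus", some "neptune", some "pluto"] : List (Option String)) then s + 7
      else s) s = s + (l.map pvF2).sum := by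
  induction l generalizing s with
  | nil => simp
  | cons a t ih =>
    simp only [List.foldl_cons, List.map_cons, List.sum_cons, ih, pvF2]
    split_ifs <;> ring

theorem loop3_eq (l : List (List (String × String))) (s : Int) :
    l.foldl (fun s a =>
      if List.lookup "transit_planet" a = some "moon" then s + 4 else s) s
    = s + (l.map pvF3).sum := by
  induction l generalizing s with
  | nil => simp
  | cons a t ih =>
    simp only [List.foldl_cons, List.map_cons, List.sum_cons, ih, pvF3]
    split_ifs <;> ring

-- evaluate B's literal weight tables as branch expressions
theorem pvAspect_table (v : String) : (List.lookup v pvAspectPoints).getD 0 =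
    (if v ∈ (["conjunction","opposition","square"] : List String) then 5
     else if v ∈ (["trine","sextile"] : List String) then 3 else 0) := by
  by_cases h1 : v = "conjunction" <;> by_cases h2 : v = "opposition" <;>
  by_cases h3 : v = "square" <;> by_cases h4 : v = "trine" <;>
  by_cases h5 : v = "sextile" <;> simp_all [pvAspectPoints] <;>
  first
  | decide
  | simp [List.lookup, beq_eq_false_iff_ne.mpr h1, beq_eq_false_iff_ne.mpr h2,
      beq_eq_false_iff_ne.mpr h3, beq_eq_false_iff_ne.mpr h4, beq_eq_false_iff_ne.mpr h5]

theorem pvPlanet_table (p : String) : (List.lookup p pvPlanetPoints).getD 0 =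
    (if p ∈ (["uranus","neptune","pluto"] : List String) then 7 else 0)
    + (if p = "moon" then 4 else 0) := by
  by_cases q1 : p = "uranus" <;> by_cases q2 : p = "neptune" <;>
  by_cases q3 : p = "pluto" <;> by_cases q4 : p = "moon" <;> simp_all [pvPlanetPoints] <;>
  first
  | decide
  | simp [List.lookup, beq_eq_false_iff_ne.mpr q1, beq_eq_false_iff_ne.mpr q2,
      beq_eq_false_iff_ne.mpr q3, beq_eq_false_iff_ne.mpr q4]

-- pointwise: B's two table lookups equal the sum of A's three branch contributions
theorem point_eq (a : List (String × String)) :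
    (List.lookup ((List.lookup "aspect" a).getD "") pvAspectPoints).getD 0
    + (match List.lookup "transit_planet" a with
       | some p => (List.lookup p pvPlanetPoints).getD 0
       | none => 0)
    = pvF1 a + pvF2 a + pvF3 a := by
  unfold pvF1 pvF2 pvF3
  rcases hp : List.lookup "transit_planet" a with _ | p <;>
    simp [hp, pvAspect_table, pvPlanet_table] <;> ring

theorem sum_split (l : List (List (String × String))) :
    (l.map (fun a =>
      (List.lookup ((List.lookup "aspect" a).getD "") pvAspectPoints).getD 0
      + (match List.lookup "transit_planet" a with
         | some p => (List.lookup p pvPlanetPoints).getD 0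
         | none => 0))).sum
    = (l.map pvF1).sum + (l.map pvF2).sum + (l.map pvF3).sum := by
  induction l with
  | nil => simp
  | cons a t ih =>
    rw [List.map_cons, List.sum_cons, point_eq, ih]
    simp only [List.map_cons, List.sum_cons]
    ring

theorem clamp_eq (s : Int) : max 1 (min 100 s) = min (max s 1) 100 := by
  rcases le_total s 1 with h | h <;> rcases le_total s 100 with h' | h' <;>
    simp [max_def, min_def] <;> omega

-- ===== VERDICT (by name: the statement is the Claim_ definition above) =====
theorem calculate_g_code_intensity_spec : Claim_equal_calculate_g_code_intensity := by
  intro td aspects _ _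
  unfold Spec_calculate_g_code_intensity calculate_g_code_intensity calculate_g_code_intensity_alt
  simp only [loop1_eq, loop2_eq, loop3_eq, sum_split, clamp_eq]
  ring_nf
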